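-- pv_equiv track=rewrite | github.com/thealper2/codewars-solutions | 7-kyu/are_the_twins_even.py | even_twins
-- ===== SOURCE A (Python) =====
-- def even_twins(numbers):
--     n = len(numbers)
--     seen = []
--     count = 0
--
--     for i in range(n):
--         for j in range(i + 1, n):
--             s = numbers[i] + numbers[j]
--             if s % 2 == 0 and s not in seen:
--                 count += 1
--                 seen.append(s)
--
--     return count
-- ===== SOURCE B (Python) =====
-- def even_twins(numbers):
--     # Partition by parity: a pairwise sum is even exactly when both addends
--     # have the same parity, so collect sums within each parity group.
--     evens = [x for x in numbers if x % 2 == 0]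
--     odds = [x for x in numbers if x % 2 != 0]
--     sums = set()
--     for group in (evens, odds):
--         rest = list(group)
--         while rest:
--             a = rest.pop(0)
--             for b in rest:
--                 sums.add(a + b)
--     return len(sums)
-- ===== Notes on version B (the rewrite author's own statement) =====
-- stated objective: faster
-- what changed: Replaces the all-pairs index double loop with a %2 filter and a linear-scan 'seen' list by a parity partition (evens/odds), collecting pairwise sums within each parity group into a hash set whose size is returned.
import Mathlib
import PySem

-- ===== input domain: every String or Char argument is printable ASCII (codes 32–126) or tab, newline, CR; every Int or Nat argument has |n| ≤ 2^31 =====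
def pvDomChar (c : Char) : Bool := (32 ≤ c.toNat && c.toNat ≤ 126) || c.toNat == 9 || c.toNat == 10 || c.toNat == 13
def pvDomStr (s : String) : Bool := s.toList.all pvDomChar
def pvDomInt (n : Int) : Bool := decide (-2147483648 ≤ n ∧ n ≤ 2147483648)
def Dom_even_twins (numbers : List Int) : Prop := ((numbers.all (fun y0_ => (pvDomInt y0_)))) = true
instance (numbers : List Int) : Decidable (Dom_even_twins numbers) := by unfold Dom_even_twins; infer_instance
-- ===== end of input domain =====

-- B replaces A's all-pairs index double loop (with a %2 filter and a linear 'seen' scan)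
-- by a parity partition: pairwise sums within the evens and within the odds, collected in a set.


-- ===== PORT A =====
def even_twins (numbers : List Int) : Int :=
  let n : Int := numbers.length
  let st :=
    (PySem.List.pyRange 0 n 1).foldl (fun st i =>
      (PySem.List.pyRange (i + 1) n 1).foldl (fun st j =>
        let s := PySem.List.pyGetD numbers i 0 + PySem.List.pyGetD numbers j 0
        if PySem.Int.mod s 2 == 0 && !(st.2.contains s) then (st.1 + 1, st.2 ++ [s]) else st)
        st)
      ((0 : Int), ([] : List Int))
  st.1

-- ===== PORT B =====
-- the 'while rest: a = rest.pop(0); for b in rest: sums.add(a + b)' loop of Source B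
def pvGroupSums (sums : PySem.Set Int) : List Int → PySem.Set Int
  | [] => sums
  | a :: rest => pvGroupSums (rest.foldl (fun s b => PySem.Set.add s (a + b)) sums) rest

def even_twins_alt (numbers : List Int) : Int :=
  let evens := numbers.filter (fun x => PySem.Int.mod x 2 == 0)
  let odds := numbers.filter (fun x => PySem.Int.mod x 2 != 0)
  let sums := pvGroupSums (pvGroupSums PySem.Set.empty evens) odds
  PySem.Set.len sums

-- ===== PRECONDITION & SPEC =====
def Spec_even_twins (numbers : List Int) (out : Int) : Prop := out = even_twins_alt numbers
instance (numbers : List Int) (out : Int) : Decidable (Spec_even_twins numbers out) := by unfold Spec_even_twins; infer_instance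

-- ===== CLAIM (what is proved, stated in full; the proofs are below) =====
def Claim_equal_even_twins : Prop := ∀ (numbers : List Int), Dom_even_twins numbers → Spec_even_twins numbers (even_twins numbers)

-- ===== LEMMAS AND PROOFS =====

-- the stream of pairwise sums numbers[i] + numbers[j], i < j, in A's traversal order
def pairStream : List Int → List Int
  | [] => []
  | a :: rest => rest.map (fun b => a + b) ++ pairStream rest

-- A's loop body as a step function on (count, seen)
def pvStep (st : Int × List Int) (s : Int) : Int × List Int :=
  if PySem.Int.mod s 2 == 0 && !(st.2.contains s) then (st.1 + 1, st.2 ++ [s]) else st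

theorem mem_pairStream {l : List Int} {s : Int} :
    s ∈ pairStream l ↔ ∃ a b, [a, b].Sublist l ∧ a + b = s := by
  induction l with
  | nil => simp [pairStream]
  | cons a rest ih =>
    simp only [pairStream, List.mem_append, List.mem_map, ih]
    constructor
    · rintro (⟨b, hb, he⟩ | ⟨x, y, hsub, he⟩)
      · exact ⟨a, b, List.Sublist.cons₂ a (List.singleton_sublist.2 hb), he⟩
      · exact ⟨x, y, hsub.cons a, he⟩
    · rintro ⟨x, y, hsub, he⟩
      rcases List.sublist_cons_iff.1 hsub with h | ⟨r, heq, hr⟩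
      · exact Or.inr ⟨x, y, h, he⟩
      · obtain ⟨rfl, rfl⟩ : x = a ∧ r = [y] := by
          injection heq with h1 h2; exact ⟨h1, h2.symm⟩
        exact Or.inl ⟨y, List.singleton_sublist.1 hr, he⟩

theorem sub2_filter (p : Int → Bool) {a b : Int} {l : List Int} :
    [a, b].Sublist (l.filter p) ↔ [a, b].Sublist l ∧ p a = true ∧ p b = true := by
  constructor
  · intro h
    refine ⟨h.trans List.filter_sublist, ?_, ?_⟩
    · exact List.of_mem_filter (h.subset (by simp))
    · exact List.of_mem_filter (h.subset (by simp))
  · rintro ⟨h, pa, pb⟩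
    have h2 := h.filter p
    rwa [show ([a, b]).filter p = [a, b] by simp [List.filter, pa, pb]] at h2

theorem parity_key (a b : Int) :
    PySem.Int.mod (a + b) 2 = 0 ↔
      ((PySem.Int.mod a 2 = 0 ∧ PySem.Int.mod b 2 = 0) ∨
       (PySem.Int.mod a 2 ≠ 0 ∧ PySem.Int.mod b 2 ≠ 0)) := by
  rw [PySem.Int.mod_eq_emod_of_pos (by norm_num), PySem.Int.mod_eq_emod_of_pos (by norm_num),
    PySem.Int.mod_eq_emod_of_pos (by norm_num)]
  omega

theorem pairStream_filter_iff (numbers : List Int) (s : Int) :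
    (s ∈ pairStream numbers ∧ PySem.Int.mod s 2 = 0) ↔
      (s ∈ pairStream (numbers.filter (fun x => PySem.Int.mod x 2 == 0)) ∨
       s ∈ pairStream (numbers.filter (fun x => PySem.Int.mod x 2 != 0))) := by
  simp only [mem_pairStream]
  constructor
  · rintro ⟨⟨a, b, hsub, rfl⟩, hm⟩
    rcases (parity_key a b).1 hm with ⟨ha, hb⟩ | ⟨ha, hb⟩
    · exact Or.inl ⟨a, b, (sub2_filter _).2 ⟨hsub, by simp only [beq_iff_eq]; exact ha,
        by simp only [beq_iff_eq]; exact hb⟩, rfl⟩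
    · exact Or.inr ⟨a, b, (sub2_filter _).2 ⟨hsub, by simp only [bne_iff_ne, ne_eq]; exact ha,
        by simp only [bne_iff_ne, ne_eq]; exact hb⟩, rfl⟩
  · rintro (⟨a, b, hsub, rfl⟩ | ⟨a, b, hsub, rfl⟩)
    · obtain ⟨h, pa, pb⟩ := (sub2_filter _).1 hsub
      simp only [beq_iff_eq] at pa pb
      exact ⟨⟨a, b, h, rfl⟩, (parity_key a b).2 (Or.inl ⟨pa, pb⟩)⟩
    · obtain ⟨h, pa, pb⟩ := (sub2_filter _).1 hsub
      simp only [bne_iff_ne, ne_eq] at pa pb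
      exact ⟨⟨a, b, h, rfl⟩, (parity_key a b).2 (Or.inr ⟨pa, pb⟩)⟩

theorem pvGroupSums_eq_update (s : PySem.Set Int) (l : List Int) :
    pvGroupSums s l = PySem.Set.update s (pairStream l) := by
  induction l generalizing s with
  | nil => simp [pvGroupSums, pairStream, PySem.Set.update]
  | cons a rest ih =>
    show pvGroupSums (rest.foldl (fun s b => PySem.Set.add s (a + b)) s) rest = _
    rw [ih, ← PySem.Set.update_map_eq_foldl_add, ← PySem.Set.update_append]
    rfl

theorem foldl_pvStep_inv (stream : List Int) (st : Int × List Int)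
    (h1 : st.1 = (st.2.length : Int)) (h2 : st.2.Nodup) :
    (stream.foldl pvStep st).1 = ((stream.foldl pvStep st).2.length : Int) ∧
    (stream.foldl pvStep st).2.Nodup ∧
    (∀ s, s ∈ (stream.foldl pvStep st).2 ↔ s ∈ st.2 ∨ (s ∈ stream ∧ PySem.Int.mod s 2 = 0)) := by
  induction stream generalizing st with
  | nil => exact ⟨h1, h2, by simp⟩
  | cons x xs ih =>
    simp only [List.foldl_cons]
    by_cases hc : (PySem.Int.mod x 2 == 0 && !(st.2.contains x)) = true
    · have hst : pvStep st x = (st.1 + 1, st.2 ++ [x]) := by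
        simp only [pvStep, hc, if_true]
      rw [hst]
      rw [Bool.and_eq_true] at hc
      obtain ⟨hx', hn'⟩ := hc
      have hx : PySem.Int.mod x 2 = 0 := by rw [← beq_iff_eq]; exact hx'
      have hnm : x ∉ st.2 := by simpa using hn'
      obtain ⟨i1, i2, i3⟩ := ih (st.1 + 1, st.2 ++ [x])
        (by simp only [h1, List.length_append, List.length_singleton]; push_cast; ring)
        (List.Nodup.append h2 (List.nodup_singleton x) (List.disjoint_singleton.2 hnm))
      refine ⟨i1, i2, fun s => ?_⟩
      rw [i3 s]
      simp only [List.mem_append, List.mem_cons, List.not_mem_nil, or_false]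
      constructor
      · rintro ((h | rfl) | ⟨h, he⟩)
        · exact Or.inl h
        · exact Or.inr ⟨Or.inl rfl, hx⟩
        · exact Or.inr ⟨Or.inr h, he⟩
      · rintro (h | ⟨(rfl | h), he⟩)
        · exact Or.inl (Or.inl h)
        · exact Or.inl (Or.inr rfl)
        · exact Or.inr ⟨h, he⟩
    · have hst : pvStep st x = st := by simp only [pvStep]; rw [if_neg hc]
      rw [hst]
      obtain ⟨i1, i2, i3⟩ := ih st h1 h2
      refine ⟨i1, i2, fun s => ?_⟩
      rw [i3 s]
      simp only [Bool.and_eq_true, beq_iff_eq, Bool.not_eq_true',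
        List.contains_eq_mem, decide_eq_false_iff_not, not_and_or, not_not] at hc
      simp only [List.mem_cons]
      rcases hc with hodd | hmem
      · constructor
        · rintro (h | ⟨h, he⟩)
          · exact Or.inl h
          · exact Or.inr ⟨Or.inr h, he⟩
        · rintro (h | ⟨(rfl | h), he⟩)
          · exact Or.inl h
          · exact absurd he hodd
          · exact Or.inr ⟨h, he⟩
      · constructor
        · rintro (h | ⟨h, he⟩)
          · exact Or.inl h
          · exact Or.inr ⟨Or.inr h, he⟩
        · rintro (h | ⟨(rfl | h), he⟩)
          · exact Or.inl h
          · exact Or.inl hmem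
          · exact Or.inr ⟨h, he⟩

theorem rangeFold (l : List Int) (m k : Nat) (st : Int × List Int)
    (hm : l.length - k ≤ m) :
    (PySem.List.pyRange (k : Int) (l.length : Int) 1).foldl (fun st i =>
        (PySem.List.pyRange (i + 1) (l.length : Int) 1).foldl (fun st j =>
          pvStep st (PySem.List.pyGetD l i 0 + PySem.List.pyGetD l j 0)) st) st
      = (pairStream (l.drop k)).foldl pvStep st := by
  induction m generalizing k st with
  | zero =>
    have hk : l.length ≤ k := by omega
    rw [PySem.List.pyRange_one_eq_nil (by exact_mod_cast hk),
      List.drop_eq_nil_of_le hk]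
    rfl
  | succ m ih =>
    by_cases hk : k < l.length
    · rw [PySem.List.pyRange_one_cons (by exact_mod_cast hk)]
      simp only [List.foldl_cons]
      have hdrop : l.drop k = l.getD k 0 :: l.drop (k + 1) := by
        rw [List.drop_eq_getElem_cons hk, List.getD_eq_getElem l 0 hk]
      have hinner :
          (PySem.List.pyRange ((k : Int) + 1) (l.length : Int) 1).foldl (fun st j =>
            pvStep st (PySem.List.pyGetD l (k : Int) 0 + PySem.List.pyGetD l j 0)) st
          = (l.drop (k + 1)).foldl (fun st b => pvStep st (PySem.List.pyGetD l (k : Int) 0 + b)) st := by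
        have := PySem.List.foldl_pyRange_pyGetD' l 0
          (fun st b => pvStep st (PySem.List.pyGetD l (k : Int) 0 + b)) st
          (a := (k : Int) + 1) (by positivity)
        simpa using this
      rw [hinner, hdrop]
      simp only [pairStream, List.foldl_append, List.foldl_map]
      rw [PySem.List.pyGetD_natCast]
      have := ih (k := k + 1)
        ((l.drop (k + 1)).foldl (fun st b => pvStep st (l.getD k 0 + b)) st) (by omega)
      push_cast at this ⊢
      rw [this]
    · have hk' : l.length ≤ k := by omega
      rw [PySem.List.pyRange_one_eq_nil (by exact_mod_cast hk'),
        List.drop_eq_nil_of_le hk']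
      rfl

theorem even_twins_eq_foldl (numbers : List Int) :
    even_twins numbers = ((pairStream numbers).foldl pvStep ((0 : Int), ([] : List Int))).1 := by
  show ((PySem.List.pyRange 0 (numbers.length : Int) 1).foldl (fun st i =>
      (PySem.List.pyRange (i + 1) (numbers.length : Int) 1).foldl (fun st j =>
        pvStep st (PySem.List.pyGetD numbers i 0 + PySem.List.pyGetD numbers j 0)) st)
      ((0 : Int), ([] : List Int))).1 = _
  have := rangeFold numbers numbers.length 0 ((0 : Int), ([] : List Int)) (by omega)
  simp only [Nat.cast_zero, List.drop_zero] at this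
  rw [this]

theorem even_twins_spec : Claim_equal_even_twins := by
  intro numbers _
  unfold Spec_even_twins
  rw [even_twins_eq_foldl]
  obtain ⟨h1, h2, h3⟩ := foldl_pvStep_inv (pairStream numbers) ((0 : Int), ([] : List Int))
    rfl List.nodup_nil
  have halt : even_twins_alt numbers =
      ((PySem.Set.ofList (pairStream (numbers.filter (fun x => PySem.Int.mod x 2 == 0)) ++
        pairStream (numbers.filter (fun x => PySem.Int.mod x 2 != 0)))).length : Int) := by
    simp only [even_twins_alt]
    rw [pvGroupSums_eq_update, pvGroupSums_eq_update,
      show (PySem.Set.empty : PySem.Set Int) = [] from rfl,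
      PySem.Set.update_nil_left, ← PySem.Set.ofList_append]
    simp [PySem.Set.len]
  have hperm : ((pairStream numbers).foldl pvStep ((0 : Int), ([] : List Int))).2.Perm
      (PySem.Set.ofList (pairStream (numbers.filter (fun x => PySem.Int.mod x 2 == 0)) ++
        pairStream (numbers.filter (fun x => PySem.Int.mod x 2 != 0)))) := by
    refine (List.perm_ext_iff_of_nodup h2 (PySem.Set.nodup_ofList _)).2 (fun s => ?_)
    rw [h3 s, PySem.Set.mem_ofList, List.mem_append]
    simp only [List.not_mem_nil, false_or]
    exact pairStream_filter_iff numbers s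
  rw [h1, halt, hperm.length_eq]
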